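-- pv_equiv track=rewrite | github.com/kaito2399/Bi-Objective-MST-algorithms | pareto-opt_solutions/main_sourd_spanjaard.py | undominated_trees
-- ===== SOURCE A (Python) =====
-- def undominated_trees(sol_to_trees):
--   sorted_solutions = sorted(sol_to_trees.keys())
--   undomi_sol_to_trees = {sorted_solutions[0]:sol_to_trees[sorted_solutions[0]]}
--   idx = 0
--   c = 1
--   while idx+c <= len(sorted_solutions)-1:
--     if sorted_solutions[idx][1] > sorted_solutions[idx+c][1]:
--       undomi_sol_to_trees[sorted_solutions[idx+c]] = sol_to_trees[sorted_solutions[idx+c]]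
--       idx += c
--       c = 1
--     else:
--       c += 1
--
--   return undomi_sol_to_trees
-- ===== SOURCE B (Python) =====
-- def undominated_trees(sol_to_trees):
--     keys = sorted(sol_to_trees)
--     return {p: sol_to_trees[p] for p in keys
--             if not any(q[0] <= p[0] and q[1] <= p[1] and q != p for q in keys)}
-- ===== Notes on version B (the rewrite author's own statement) =====
-- stated objective: simpler
-- what changed: A's single reference-advancing sweep over the sorted keys is replaced by a naive pairwise-domination filter: a key is kept iff no other key weakly dominates it in both coordinates, written as one dict comprehension.
import Mathlib
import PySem

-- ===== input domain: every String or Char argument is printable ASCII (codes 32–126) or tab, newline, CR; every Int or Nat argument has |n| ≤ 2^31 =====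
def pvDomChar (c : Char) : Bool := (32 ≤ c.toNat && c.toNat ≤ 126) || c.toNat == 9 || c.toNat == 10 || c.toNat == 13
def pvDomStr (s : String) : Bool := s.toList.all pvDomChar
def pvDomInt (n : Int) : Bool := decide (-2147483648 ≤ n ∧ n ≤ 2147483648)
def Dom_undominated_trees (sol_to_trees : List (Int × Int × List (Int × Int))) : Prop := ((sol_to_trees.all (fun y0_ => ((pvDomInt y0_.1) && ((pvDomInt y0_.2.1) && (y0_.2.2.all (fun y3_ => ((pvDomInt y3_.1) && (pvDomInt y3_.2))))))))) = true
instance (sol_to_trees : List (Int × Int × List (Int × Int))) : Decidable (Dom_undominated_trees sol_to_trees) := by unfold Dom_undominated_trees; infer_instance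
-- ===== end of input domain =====

-- B replaces A's reference-advancing sweep over the sorted keys by a naive pairwise-domination
-- filter (simpler: one comprehension); equivalence of the returned dict is proved on non-empty
-- inputs with distinct keys.


-- ===== PORT A =====
-- the input dict, as a PySem.Dict keyed by the (cost1, cost2) pair
def pvDictA (sol_to_trees : List (Int × Int × List (Int × Int))) :
    PySem.Dict (Int × Int) (List (Int × Int)) :=
  PySem.Dict.mk (sol_to_trees.map (fun e => ((e.1, e.2.1), e.2.2)))

-- the while loop of A; idx, c are the Python variables (always ≥ 0 there, so Nat is exact),
-- and the Python guard  idx+c <= len(keys)-1  is, over the integers, exactly  idx+c < len(keys).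
-- keys.getD is exact for the in-range nonnegative indices the guard establishes.
def pvSweepA (d : PySem.Dict (Int × Int) (List (Int × Int))) (keys : List (Int × Int))
    (idx c : Nat) (acc : PySem.Dict (Int × Int) (List (Int × Int))) :
    PySem.Dict (Int × Int) (List (Int × Int)) :=
  if h : idx + c < keys.length then
    if (keys.getD idx (0, 0)).2 > (keys.getD (idx + c) (0, 0)).2 then
      pvSweepA d keys (idx + c) 1
        (acc.insert (keys.getD (idx + c) (0, 0)) (d.getD (keys.getD (idx + c) (0, 0)) []))
    else
      pvSweepA d keys idx (c + 1) acc
  else acc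
termination_by keys.length - (idx + c)
decreasing_by all_goals omega

def undominated_trees (sol_to_trees : List (Int × Int × List (Int × Int))) :
    List (Int × Int × List (Int × Int)) :=
  let d := pvDictA sol_to_trees
  let sorted_solutions := PySem.List.sorted2 d.keys Prod.fst Prod.snd
  -- sorted_solutions[0]: IndexError on the empty dict, excluded by Pre_
  let k0 := sorted_solutions.getD 0 (0, 0)
  let undomi := (PySem.Dict.empty).insert k0 (d.getD k0 [])
  (pvSweepA d sorted_solutions 0 1 undomi).items.map (fun p => (p.1.1, p.1.2, p.2))

-- ===== PORT B =====
-- first-match lookup sol_to_trees[p]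
def pvLookupB (sol_to_trees : List (Int × Int × List (Int × Int))) (p : Int × Int) :
    List (Int × Int) :=
  ((sol_to_trees.find? (fun e => (e.1, e.2.1) == p)).map (fun e => e.2.2)).getD []

def undominated_trees_alt (sol_to_trees : List (Int × Int × List (Int × Int))) :
    List (Int × Int × List (Int × Int)) :=
  let keys := PySem.List.sorted2 (sol_to_trees.map (fun e => (e.1, e.2.1))) Prod.fst Prod.snd
  (keys.filter (fun p =>
      !(keys.any (fun q => decide (q.1 ≤ p.1) && decide (q.2 ≤ p.2) && (q != p))))).map
    (fun p => (p.1, p.2, pvLookupB sol_to_trees p))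

-- ===== PRECONDITION & SPEC =====
-- Pre_ excludes the empty input (A raises IndexError) and association lists with duplicate
-- (cost1, cost2) keys, which cannot occur as the image of a Python dict.
def Pre_undominated_trees (sol_to_trees : List (Int × Int × List (Int × Int))) : Prop :=
  sol_to_trees ≠ [] ∧ (sol_to_trees.map (fun e => (e.1, e.2.1))).Nodup
instance (sol_to_trees : List (Int × Int × List (Int × Int))) : Decidable (Pre_undominated_trees sol_to_trees) := by unfold Pre_undominated_trees; infer_instance

def pvWitness_undominated_trees : (List (Int × Int × List (Int × Int))) := [(0, 0, [(1, 2)]), (1, -1, [])]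

def Spec_undominated_trees (sol_to_trees : List (Int × Int × List (Int × Int))) (out : List (Int × Int × List (Int × Int))) : Prop := out = undominated_trees_alt sol_to_trees
instance (sol_to_trees : List (Int × Int × List (Int × Int))) (out : List (Int × Int × List (Int × Int))) : Decidable (Spec_undominated_trees sol_to_trees out) := by unfold Spec_undominated_trees; infer_instance

-- ===== CLAIM (what is proved, stated in full; the proofs are below) =====
def Claim_equal_undominated_trees : Prop := ∀ (sol_to_trees : List (Int × Int × List (Int × Int))), Dom_undominated_trees sol_to_trees → Pre_undominated_trees sol_to_trees → Spec_undominated_trees sol_to_trees (undominated_trees sol_to_trees)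

-- ===== LEMMAS AND PROOFS =====

-- strict lexicographic order on the (cost1, cost2) keys: Python's tuple '<'
def pvLex (a b : Int × Int) : Prop := a.1 < b.1 ∨ (a.1 = b.1 ∧ a.2 < b.2)

-- the boolean comparison sorted2 Prod.fst Prod.snd sorts by
def pvBefore (a b : Int × Int) : Bool :=
  decide (a.1 < b.1) || (!decide (b.1 < a.1) && decide (a.2 < b.2))

theorem pvBefore_iff (a b : Int × Int) : pvBefore a b = true ↔ pvLex a b := by
  simp [pvBefore, pvLex]; omega

theorem pvLex_trans {a b c : Int × Int} (h1 : pvLex a b) (h2 : pvLex b c) : pvLex a c := by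
  rcases h1 with h1 | ⟨h1, h1'⟩ <;> rcases h2 with h2 | ⟨h2, h2'⟩ <;>
    simp [pvLex] <;> omega

theorem pvLex_ne {a b : Int × Int} (h : pvLex a b) : a ≠ b := by
  rintro rfl; rcases h with h | ⟨_, h⟩ <;> omega

theorem pvLex_total {a b : Int × Int} (h : a ≠ b) : pvLex a b ∨ pvLex b a := by
  rcases a with ⟨a1, a2⟩; rcases b with ⟨b1, b2⟩
  simp only [pvLex]
  by_cases h1 : a1 = b1
  · subst h1
    have : a2 ≠ b2 := by simpa using h
    omega
  · omega

theorem pvInsertBy_pairwise (x : Int × Int) (acc : List (Int × Int))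
    (h : acc.Pairwise pvLex) (hx : x ∉ acc) :
    (PySem.List.insertBy pvBefore x acc).Pairwise pvLex := by
  induction acc with
  | nil => simp [PySem.List.insertBy]
  | cons y ys ih =>
    simp only [PySem.List.insertBy]
    rcases List.pairwise_cons.1 h with ⟨hy, hys⟩
    by_cases hb : pvBefore x y = true
    · simp only [hb, if_true]
      refine List.pairwise_cons.2 ⟨?_, h⟩
      intro z hz
      rcases List.mem_cons.1 hz with rfl | hz
      · exact (pvBefore_iff x _).1 hb
      · exact pvLex_trans ((pvBefore_iff x _).1 hb) (hy z hz)
    · simp only [hb, if_false]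
      refine List.pairwise_cons.2 ⟨?_, ih hys (fun hc => hx (List.mem_cons_of_mem _ hc))⟩
      intro z hz
      rcases (PySem.List.mem_insertBy pvBefore x z ys).1 hz with rfl | hz
      · have hne : y ≠ z := fun he => hx (by simp [he])
        rcases pvLex_total hne with h1 | h1
        · exact h1
        · exact absurd ((pvBefore_iff z y).2 h1) hb
      · exact hy z hz

theorem pvFoldl_insertBy_pairwise (xs acc : List (Int × Int))
    (hacc : acc.Pairwise pvLex) (hnd : xs.Nodup) (hdisj : ∀ a ∈ acc, a ∉ xs) :
    (xs.foldl (fun acc x => PySem.List.insertBy pvBefore x acc) acc).Pairwise pvLex := by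
  induction xs generalizing acc with
  | nil => simpa using hacc
  | cons x xs ih =>
    simp only [List.foldl_cons]
    rcases List.nodup_cons.1 hnd with ⟨hx, hnd'⟩
    refine ih _ (pvInsertBy_pairwise x acc hacc ?_) hnd' ?_
    · intro hc; exact (hdisj x hc) (List.mem_cons_self)
    · intro a ha
      rcases (PySem.List.mem_insertBy pvBefore x a acc).1 ha with rfl | ha
      · exact hx
      · exact fun hc => (hdisj a ha) (List.mem_cons_of_mem _ hc)

theorem pvSorted2_pairwise (xs : List (Int × Int)) (h : xs.Nodup) :
    (PySem.List.sorted2 xs Prod.fst Prod.snd).Pairwise pvLex := by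
  have : PySem.List.sorted2 xs Prod.fst Prod.snd =
      xs.foldl (fun acc x => PySem.List.insertBy pvBefore x acc) [] := rfl
  rw [this]
  exact pvFoldl_insertBy_pairwise xs [] (by simp) h (by simp)

-- the reference-advancing sweep, with the current reference r explicit and indices gone
def pvGo (r : Int × Int) : List (Int × Int) → List (Int × Int)
  | [] => []
  | k :: ks => if r.2 > k.2 then k :: pvGo k ks else pvGo r ks

-- lookup agreement between the two ports
theorem pvLookup_eq (s : List (Int × Int × List (Int × Int))) (k : Int × Int) :
    (pvDictA s).getD k [] = pvLookupB s k := by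
  induction s with
  | nil => simp [pvDictA, pvLookupB, PySem.Dict.getD, PySem.Dict.get?]
  | cons e s ih =>
    simp only [pvDictA, List.map_cons] at *
    rw [PySem.Dict.getD_eq_get?_getD, PySem.Dict.get?_mk_cons]
    by_cases h : ((e.1, e.2.1) : Int × Int) == k
    · simp [h, pvLookupB, List.find?_cons, h]
    · rw [if_neg (by simpa using h)]
      rw [← PySem.Dict.getD_eq_get?_getD]
      simpa [pvLookupB, List.find?_cons, h] using ih

-- B's keep test
def pvKeep (keys : List (Int × Int)) (p : Int × Int) : Bool :=
  !(keys.any (fun q => decide (q.1 ≤ p.1) && decide (q.2 ≤ p.2) && (q != p)))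

theorem pvKeep_iff (pre l : List (Int × Int)) (k r : Int × Int)
    (hp : (pre ++ k :: l).Pairwise pvLex) (hr : r ∈ pre) (hmin : ∀ q ∈ pre, r.2 ≤ q.2) :
    pvKeep (pre ++ k :: l) k = true ↔ k.2 < r.2 := by
  rcases List.pairwise_append.1 hp with ⟨hpre, hkl, hcross⟩
  rcases List.pairwise_cons.1 hkl with ⟨hafter, _⟩
  have hcr : ∀ q ∈ pre, pvLex q k := fun q hq => hcross q hq k (List.mem_cons_self)
  constructor
  · intro hk
    by_contra hlt
    have hdom : (decide (r.1 ≤ k.1) && decide (r.2 ≤ k.2) && (r != k)) = true := by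
      have h1 : pvLex r k := hcr r hr
      have hne : r ≠ k := pvLex_ne h1
      have : r.1 ≤ k.1 := by rcases h1 with h | ⟨h, _⟩ <;> omega
      simp [this, hne]
      omega
    have hmem : r ∈ pre ++ k :: l := List.mem_append_left _ hr
    have hany : ((pre ++ k :: l).any
        (fun q => decide (q.1 ≤ k.1) && decide (q.2 ≤ k.2) && (q != k))) = true :=
      List.any_eq_true.2 ⟨r, hmem, hdom⟩
    simp [pvKeep, hany] at hk
  · intro hlt
    simp only [pvKeep, Bool.not_eq_eq_eq_not, Bool.not_true, List.any_eq_false]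
    intro q hq
    rcases List.mem_append.1 hq with hq | hq
    · -- q earlier than k: q.2 ≥ r.2 > k.2
      have := hmin q hq
      simp; omega
    · rcases List.mem_cons.1 hq with rfl | hq
      · simp
      · -- q later than k: pvLex k q
        have h1 := hafter q hq
        rcases h1 with h | ⟨h, h'⟩ <;> · simp; omega

theorem pvGo_eq_filter (l : List (Int × Int)) :
    ∀ (pre : List (Int × Int)) (r : Int × Int),
    (pre ++ l).Pairwise pvLex → r ∈ pre → (∀ q ∈ pre, r.2 ≤ q.2) →
    l.filter (pvKeep (pre ++ l)) = pvGo r l := by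
  induction l with
  | nil => intro pre r _ _ _; simp [pvGo]
  | cons k l ih =>
    intro pre r hp hr hmin
    have hkeep := pvKeep_iff pre l k r hp hr hmin
    have hassoc : pre ++ k :: l = (pre ++ [k]) ++ l := by simp
    by_cases hlt : k.2 < r.2
    · have hk : pvKeep (pre ++ k :: l) k = true := hkeep.2 hlt
      rw [List.filter_cons_of_pos hk]
      have hrec := ih (pre ++ [k]) k (by rwa [← hassoc]) (by simp)
        (by intro q hq
            rcases List.mem_append.1 hq with hq | hq
            · have := hmin q hq; omega
            · simp at hq; subst hq; omega)
      rw [hassoc, hrec]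
      simp [pvGo, hlt]
    · have hk : pvKeep (pre ++ k :: l) k = false := by
        cases hb : pvKeep (pre ++ k :: l) k
        · rfl
        · exact absurd (hkeep.1 hb) hlt
      rw [List.filter_cons_of_neg (by simp [hk])]
      have hrec := ih (pre ++ [k]) r (by rwa [← hassoc]) (List.mem_append_left _ hr)
        (by intro q hq
            rcases List.mem_append.1 hq with hq | hq
            · exact hmin q hq
            · simp at hq; subst hq; omega)
      rw [hassoc, hrec]
      simp [pvGo, hlt]

-- the indexed while-loop equals the reference-carrying recursion
theorem pvSweepA_eq (d : PySem.Dict (Int × Int) (List (Int × Int)))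
    (keys : List (Int × Int)) :
    ∀ (n idx c : Nat) (acc : PySem.Dict (Int × Int) (List (Int × Int))),
    keys.length - (idx + c) = n → idx < keys.length → keys.Nodup →
    (∀ q ∈ keys.drop (idx + c), acc.contains q = false) →
    (pvSweepA d keys idx c acc).items =
      acc.items ++ (pvGo (keys.getD idx (0, 0)) (keys.drop (idx + c))).map
        (fun k => (k, d.getD k [])) := by
  intro n
  induction n with
  | zero =>
    intro idx c acc hn hidx hnd hfresh
    have hge : keys.length ≤ idx + c := by omega
    rw [pvSweepA]
    rw [dif_neg (by omega)]
    simp [List.drop_eq_nil_of_le hge, pvGo]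
  | succ n ih =>
    intro idx c acc hn hidx hnd hfresh
    have hlt : idx + c < keys.length := by omega
    have hdrop : keys.drop (idx + c) = keys[idx + c] :: keys.drop (idx + c + 1) :=
      List.drop_eq_getElem_cons hlt
    have hgetD : keys.getD (idx + c) (0, 0) = keys[idx + c] := List.getD_eq_getElem _ _ hlt
    have hnodrop : (keys.drop (idx + c)).Nodup := hnd.sublist (List.drop_sublist _ _)
    have hknot : keys[idx + c] ∉ keys.drop (idx + c + 1) := by
      rw [hdrop] at hnodrop; exact (List.nodup_cons.1 hnodrop).1
    rw [pvSweepA, dif_pos hlt]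
    by_cases hcmp : (keys.getD idx (0, 0)).2 > (keys.getD (idx + c) (0, 0)).2
    · rw [if_pos hcmp]
      have hfreshk : acc.contains keys[idx + c] = false := by
        apply hfresh; rw [hdrop]; exact List.mem_cons_self
      have hitems : (acc.insert (keys.getD (idx + c) (0, 0))
            (d.getD (keys.getD (idx + c) (0, 0)) [])).items =
          acc.items ++ [(keys[idx + c], d.getD keys[idx + c] [])] := by
        rw [hgetD]
        exact PySem.Dict.items_insert_of_not_contains _ _ hfreshk
      rw [ih (idx + c) 1 _ (by omega) hlt hnd ?_]
      · rw [hitems, hdrop]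
        have hgetD1 : keys.getD (idx + c) (0, 0) = keys[idx + c] := hgetD
        simp only [pvGo]
        rw [if_pos (by rw [hgetD1] at hcmp; exact hcmp)]
        simp [List.getElem?_eq_getElem hlt]
      · intro q hq
        rw [hgetD, PySem.Dict.contains_insert]
        have hq' : q ∈ keys.drop (idx + c) := by rw [hdrop]; exact List.mem_cons_of_mem _ hq
        have h1 : acc.contains q = false := hfresh q hq'
        have h2 : q ≠ keys[idx + c] := fun he => hknot (he ▸ hq)
        simp [h1, h2]
    · rw [if_neg hcmp]
      rw [ih idx (c + 1) acc (by omega) hidx hnd ?_]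
      · rw [hdrop]
        simp only [pvGo]
        rw [if_neg (by rw [hgetD] at hcmp; simpa [Nat.add_assoc] using hcmp)]
        simp [Nat.add_assoc]
      · intro q hq
        apply hfresh
        rw [hdrop]
        exact List.mem_cons_of_mem _ (by simpa [Nat.add_assoc] using hq)

-- ===== VERDICT (by name: the statement is the Claim_ definition above) =====
theorem pvMain (s : List (Int × Int × List (Int × Int)))
    (hne : s ≠ []) (hnd : (s.map (fun e => (e.1, e.2.1))).Nodup) :
    undominated_trees s = undominated_trees_alt s := by
  have hkeys : (pvDictA s).keys = s.map (fun e => (e.1, e.2.1)) := by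
    simp [pvDictA, PySem.Dict.keys, Function.comp]
  set ks := PySem.List.sorted2 (s.map (fun e => (e.1, e.2.1))) Prod.fst Prod.snd with hksdef
  have hperm : ks.Perm (s.map (fun e => (e.1, e.2.1))) :=
    PySem.List.sorted2_perm (s.map (fun e => (e.1, e.2.1))) Prod.fst Prod.snd false
  have hndks : ks.Nodup := (hperm.nodup_iff).2 hnd
  have hpw : ks.Pairwise pvLex := pvSorted2_pairwise _ hnd
  have hnil : ks ≠ [] := by
    intro h
    apply hne
    have := hperm.length_eq
    rw [h] at this
    simpa using this.symm
  obtain ⟨k0, rest, hcons⟩ := List.exists_cons_of_ne_nil hnil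
  have hpwc := hcons ▸ hpw
  have hk0 : pvKeep (k0 :: rest) k0 = true := by
    simp only [pvKeep, Bool.not_eq_eq_eq_not, Bool.not_true, List.any_eq_false]
    intro q hq
    rcases List.mem_cons.1 hq with rfl | hq
    · simp
    · have h1 : pvLex k0 q := (List.pairwise_cons.1 hpwc).1 q hq
      rcases h1 with h | ⟨h, h'⟩ <;> · simp; omega
  have hA : undominated_trees s =
      (k0 :: pvGo k0 rest).map (fun k => (k.1, k.2, (pvDictA s).getD k [])) := by
    unfold undominated_trees
    simp only [hkeys, ← hksdef]
    rw [hcons]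
    have hfresh : ∀ q ∈ (k0 :: rest).drop (0 + 1),
        ((PySem.Dict.empty).insert ((k0 :: rest).getD 0 (0, 0))
          ((pvDictA s).getD ((k0 :: rest).getD 0 (0, 0)) [])).contains q = false := by
      intro q hq
      simp only [List.drop_succ_cons, List.drop_zero] at hq
      rw [PySem.Dict.contains_insert]
      have hq0 : q ≠ k0 := by
        intro h
        exact (List.nodup_cons.1 (hcons ▸ hndks)).1 (h ▸ hq)
      simp [hq0]
    rw [pvSweepA_eq (pvDictA s) (k0 :: rest) ((k0 :: rest).length - (0 + 1)) 0 1 _ rfl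
      (by simp) (hcons ▸ hndks) hfresh]
    rw [PySem.Dict.items_insert_of_not_contains _ _ (PySem.Dict.contains_empty _)]
    simp [pvGo, List.map_map, Function.comp, PySem.Dict.empty]
  have hfilter : ks.filter (pvKeep ks) = k0 :: pvGo k0 rest := by
    rw [hcons]
    rw [List.filter_cons_of_pos hk0]
    congr 1
    have h1 : ([k0] ++ rest).Pairwise pvLex := by simpa using hpwc
    have := pvGo_eq_filter rest [k0] k0 h1 (by simp) (by simp)
    simpa using this
  have hB : undominated_trees_alt s =
      (k0 :: pvGo k0 rest).map (fun p => (p.1, p.2, pvLookupB s p)) := by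
    unfold undominated_trees_alt
    simp only [← hksdef]
    have hkeepdef : (fun p => !(ks.any
        (fun q => decide (q.1 ≤ p.1) && decide (q.2 ≤ p.2) && (q != p)))) = pvKeep ks := rfl
    rw [hkeepdef, hfilter]
  rw [hA, hB]
  exact List.map_congr_left (fun k _ => by rw [pvLookup_eq])

theorem undominated_trees_spec : Claim_equal_undominated_trees := by
  intro s _ hpre
  unfold Spec_undominated_trees
  exact pvMain s hpre.1 hpre.2
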